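-- pv_equiv track=rewrite | github.com/bc36/leetcode | Python/lc2900_2999.py | maxSpending
-- ===== SOURCE A (Python) =====
-- import bisect, collections, functools, heapq, itertools, math, operator, string, sys
-- from typing import List, Optional, Tuple
--
-- def maxSpending(values: List[List[int]]) -> int:
--     h = [(v[-1], i) for i, v in enumerate(values)]
--     heapq.heapify(h)
--     ans = 0
--     for d in range(1, len(values) * len(values[0]) + 1):
--         v, i = heapq.heappop(h)
--         ans += v * d
--         values[i].pop()
--         if values[i]:
--             heapq.heappush(h, (values[i][-1], i))
--     return ans
-- ===== SOURCE B (Python) =====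
-- from typing import List
--
-- def maxSpending(values: List[List[int]]) -> int:
--     # Heap-free: each day linearly scan the rows for the cheapest current last
--     # element (value, then lowest index), buy it, and pop it off its row.
--     ans = 0
--     for d in range(1, len(values) * len(values[0]) + 1):
--         best = None  # (value, index) of the cheapest available item today
--         for i, row in enumerate(values):
--             if row and (best is None or row[-1] < best[0]):
--                 best = (row[-1], i)
--         v, i = best
--         ans += v * d
--         values[i].pop()
--     return ans
-- ===== Notes on version B (the rewrite author's own statement) =====
-- stated objective: simpler
-- what changed: Replaces the heap (heapify/heappop/heappush bookkeeping) with a plain per-day linear scan of the rows for the minimal (last value, index) pair, popping it directly; no auxiliary data structure.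
import Mathlib
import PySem

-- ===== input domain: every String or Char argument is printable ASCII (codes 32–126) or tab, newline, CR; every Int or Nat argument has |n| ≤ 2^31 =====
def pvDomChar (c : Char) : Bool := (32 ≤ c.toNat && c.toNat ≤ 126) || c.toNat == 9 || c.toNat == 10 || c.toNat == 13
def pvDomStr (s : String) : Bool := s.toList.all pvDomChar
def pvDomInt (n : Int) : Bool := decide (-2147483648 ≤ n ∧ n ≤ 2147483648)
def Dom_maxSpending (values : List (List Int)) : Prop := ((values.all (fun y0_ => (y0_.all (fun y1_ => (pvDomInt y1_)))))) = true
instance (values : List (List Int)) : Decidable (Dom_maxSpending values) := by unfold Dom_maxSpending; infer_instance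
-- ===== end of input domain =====

-- B drops A's heap for a per-day linear scan of the rows (simpler, no auxiliary
-- structure); both mutate `values` identically in Python (rows are popped); the
-- equivalence proved here is about the return value.

-- ===== PORT A =====
-- row[-1] as Python computes it (IndexError → default 0, excluded by Pre_)
def pvLast (r : List Int) : Int := (PySem.List.pyGet? r (-1)).getD 0

-- heapq is ported by its contract: the heap's observable content is its list of
-- entries, and heappop removes a minimal entry under Python's tuple
-- (lexicographic) comparison — exact here since heap entries carry distinct indices.
def pvLexMin (x y : Int × Int) : Int × Int :=
  if y.1 < x.1 ∨ (y.1 = x.1 ∧ y.2 < x.2) then y else x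

def pvHeapPop? (h : List (Int × Int)) : Option ((Int × Int) × List (Int × Int)) :=
  match h with
  | [] => none
  | x :: t => let m := t.foldl pvLexMin x; some (m, (x :: t).erase m)

def pvStepA (st : List (List Int) × List (Int × Int) × Int) (d : Int) :
    List (List Int) × List (Int × Int) × Int :=
  match pvHeapPop? st.2.1 with
  | none => st                                   -- Python: heappop raises IndexError (outside Pre_)
  | some ((v, i), h') =>
    let ans := st.2.2 + v * d
    let row := (st.1.getD i.toNat []).dropLast   -- values[i].pop(), popped value discarded
    let vals := st.1.set i.toNat row
    (vals, if row.isEmpty then h' else h' ++ [(pvLast row, i)], ans)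

def maxSpending (values : List (List Int)) : Int :=
  let h := (PySem.List.enumerate values 0).map (fun p => (pvLast p.2, p.1))
  let days := PySem.List.len values * PySem.List.len ((PySem.List.pyGet? values 0).getD [])
  ((PySem.List.pyRange 1 (days + 1) 1).foldl pvStepA (values, h, 0)).2.2

-- ===== PORT B =====
-- best = None / (value, index) accumulator of Source B's inner scan
def pvScanStep (best : Option (Int × Int)) (p : Int × List Int) : Option (Int × Int) :=
  match p.2, best with
  | [], _ => best
  | _ :: _, none => some (pvLast p.2, p.1)
  | _ :: _, some b => if pvLast p.2 < b.1 then some (pvLast p.2, p.1) else some b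

def pvScanBest (vals : List (List Int)) : Option (Int × Int) :=
  (PySem.List.enumerate vals 0).foldl pvScanStep none

def pvStepB (st : List (List Int) × Int) (d : Int) : List (List Int) × Int :=
  match pvScanBest st.1 with
  | none => st                                   -- Python: unpacking None raises (outside Pre_)
  | some (v, i) => (st.1.set i.toNat ((st.1.getD i.toNat []).dropLast), st.2 + v * d)

def maxSpending_alt (values : List (List Int)) : Int :=
  let days := PySem.List.len values * PySem.List.len ((PySem.List.pyGet? values 0).getD [])
  ((PySem.List.pyRange 1 (days + 1) 1).foldl pvStepB (values, 0)).2

-- ===== PRECONDITION & SPEC =====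
-- Exactly where the Python A returns: values nonempty (values[0] is read), every
-- row nonempty (v[-1] is read), and enough items for all len(values)*len(values[0])
-- days (else heappop raises on an empty heap).
def Pre_maxSpending (values : List (List Int)) : Prop :=
  values ≠ [] ∧ (∀ r ∈ values, r ≠ []) ∧
  values.length * (values.headD []).length ≤ (values.map List.length).sum
instance (values : List (List Int)) : Decidable (Pre_maxSpending values) := by
  unfold Pre_maxSpending; infer_instance

def pvWitness_maxSpending : List (List Int) := [[8, 5, 2], [6, 4, 1], [9, 7, 3]]

def Spec_maxSpending (values : List (List Int)) (out : Int) : Prop := out = maxSpending_alt values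
instance (values : List (List Int)) (out : Int) : Decidable (Spec_maxSpending values out) := by unfold Spec_maxSpending; infer_instance

-- ===== CLAIM (what is proved, stated in full; the proofs are below) =====
def Claim_equal_maxSpending : Prop := ∀ (values : List (List Int)), Dom_maxSpending values → Pre_maxSpending values → Spec_maxSpending values (maxSpending values)

-- ===== LEMMAS AND PROOFS =====

-- the multiset of (last value, index) over the currently nonempty rows, indices from k
def pvCanon (k : Int) : List (List Int) → List (Int × Int)
  | [] => []
  | r :: t => if r.isEmpty then pvCanon (k + 1) t else (pvLast r, k) :: pvCanon (k + 1) t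

-- option-seeded running minimum (the shape of B's scan accumulator)
def pvOMin (acc : Option (Int × Int)) (y : Int × Int) : Option (Int × Int) :=
  some (match acc with | none => y | some a => pvLexMin a y)

theorem pvLexMin_right_comm (b : Int × Int) (a₁ a₂ : Int × Int) :
    pvLexMin (pvLexMin b a₁) a₂ = pvLexMin (pvLexMin b a₂) a₁ := by
  rcases b with ⟨b1, b2⟩; rcases a₁ with ⟨x1, x2⟩; rcases a₂ with ⟨y1, y2⟩
  simp only [pvLexMin]
  split_ifs <;> simp_all [Prod.mk.injEq] <;> omega

theorem pvOMin_right_comm : RightCommutative pvOMin := by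
  refine ⟨fun b a₁ a₂ => ?_⟩
  rcases b with _ | a
  · simp only [pvOMin]
    rcases a₁ with ⟨x1, x2⟩; rcases a₂ with ⟨y1, y2⟩
    simp only [pvLexMin]
    split_ifs <;> simp_all [Prod.mk.injEq] <;> omega
  · simp only [pvOMin, pvLexMin_right_comm]

theorem foldl_pvOMin_some (l : List (Int × Int)) (a : Int × Int) :
    l.foldl pvOMin (some a) = some (l.foldl pvLexMin a) := by
  induction l generalizing a with
  | nil => rfl
  | cons y t ih => simp only [List.foldl_cons, pvOMin, ih]

theorem foldl_pvLexMin_mem (t : List (Int × Int)) (x : Int × Int) :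
    t.foldl pvLexMin x ∈ x :: t := by
  induction t generalizing x with
  | nil => simp
  | cons y t ih =>
    rw [List.foldl_cons]
    have hxy : pvLexMin x y = y ∨ pvLexMin x y = x := by
      unfold pvLexMin; split_ifs <;> simp
    rcases List.mem_cons.mp (ih (pvLexMin x y)) with h | h
    · rcases hxy with h' | h' <;> rw [h, h'] <;> simp
    · simp [h]

theorem mem_pvCanon {p : Int × Int} :
    ∀ (vals : List (List Int)) (k : Int), p ∈ pvCanon k vals →
      ∃ (n : Nat) (hn : n < vals.length), vals[n] ≠ [] ∧ p = (pvLast vals[n], k + n)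
  | [], k, h => by simp [pvCanon] at h
  | r :: t, k, h => by
    simp only [pvCanon] at h
    by_cases hr : r.isEmpty
    · rw [if_pos hr] at h
      obtain ⟨n, hn, hne, hp⟩ := mem_pvCanon t (k + 1) h
      refine ⟨n + 1, by simpa using hn, by simpa using hne, ?_⟩
      rw [hp]; simp only [List.getElem_cons_succ]
      congr 1; push_cast; ring
    · rw [if_neg hr] at h
      rcases List.mem_cons.mp h with h | h
      · exact ⟨0, by simp, by simpa [List.isEmpty_iff] using hr, by simpa using h⟩
      · obtain ⟨n, hn, hne, hp⟩ := mem_pvCanon t (k + 1) h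
        refine ⟨n + 1, by simpa using hn, by simpa using hne, ?_⟩
        rw [hp]; simp only [List.getElem_cons_succ]
        congr 1; push_cast; ring

-- B's scan over `enumerate vals k` equals the running minimum over pvCanon k vals,
-- provided the accumulator's index is below k (tie-break: strictly smaller index wins).
theorem scan_eq_min (vals : List (List Int)) :
    ∀ (k : Int) (b : Option (Int × Int)), (∀ q, b = some q → q.2 < k) →
      (PySem.List.enumerate vals k).foldl pvScanStep b = (pvCanon k vals).foldl pvOMin b := by
  induction vals with
  | nil => intro k b _; rfl
  | cons r t ih =>
    intro k b hb
    rw [PySem.List.enumerate_cons]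
    rw [List.foldl_cons]
    rcases r with _ | ⟨a, r'⟩
    · have hstep : pvScanStep b (k, []) = b := by cases b <;> rfl
      rw [hstep]
      simp only [pvCanon, List.isEmpty_nil, if_pos]
      exact ih (k + 1) b (fun q hq => by have := hb q hq; omega)
    · simp only [pvCanon, List.isEmpty_cons, if_neg, Bool.false_eq_true, not_false_iff,
        List.foldl_cons]
      rcases b with _ | ⟨bv, bi⟩
      · have hstep : pvScanStep none (k, a :: r') = pvOMin none (pvLast (a :: r'), k) := rfl
        rw [hstep]
        exact ih (k + 1) _ (fun q hq => by
          simp only [pvOMin] at hq; cases hq; omega)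
      · have hbi : bi < k := by simpa using hb (bv, bi) rfl
        have hstep : pvScanStep (some (bv, bi)) (k, a :: r')
            = pvOMin (some (bv, bi)) (pvLast (a :: r'), k) := by
          show (if pvLast (a :: r') < bv then some (pvLast (a :: r'), k) else some (bv, bi)) = _
          simp only [pvOMin, pvLexMin]
          split_ifs <;> simp_all <;> omega
        rw [hstep]
        exact ih (k + 1) _ (fun q hq => by
          simp only [pvOMin, pvLexMin] at hq
          split at hq <;> (cases hq; simp <;> omega))

-- initial heap: with every row nonempty, A's heap list is literally pvCanon
theorem initial_heap (vals : List (List Int)) :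
    ∀ (k : Int), (∀ r ∈ vals, r ≠ []) →
      (PySem.List.enumerate vals k).map (fun p => (pvLast p.2, p.1)) = pvCanon k vals := by
  induction vals with
  | nil => intro k _; rfl
  | cons r t ih =>
    intro k h
    rw [PySem.List.enumerate_cons]
    have hr : ¬ r.isEmpty := by simp [List.isEmpty_iff]; exact h r (by simp)
    simp only [List.map_cons, pvCanon, if_neg hr]
    exact congrArg _ (ih (k + 1) (fun x hx => h x (by simp [hx])))

-- popping row n: the canonical multiset loses (last, k+n) and gains the new last (if any)
theorem canon_set (t : List (List Int)) :
    ∀ (k : Int) (n : Nat) (hn : n < t.length), t[n] ≠ [] →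
      (pvCanon k (t.set n t[n].dropLast)).Perm
        ((pvCanon k t).erase (pvLast t[n], k + n) ++
          (if t[n].dropLast.isEmpty then [] else [(pvLast t[n].dropLast, k + n)])) := by
  induction t with
  | nil => intro k n hn; simp at hn
  | cons r t ih =>
    intro k n hn hne
    rcases n with _ | n
    · simp only [List.getElem_cons_zero] at hne ⊢
      have hr : ¬ r.isEmpty := by simpa [List.isEmpty_iff] using hne
      simp only [List.set_cons_zero, pvCanon, if_neg hr, Nat.cast_zero, add_zero,
        List.erase_cons_head]
      by_cases hd : r.dropLast.isEmpty
      · simp [hd]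
      · rw [if_neg hd, if_neg hd]
        exact (List.perm_append_singleton _ _).symm
    · simp only [List.getElem_cons_succ] at hne ⊢
      have hn' : n < t.length := by simpa using hn
      have hkn : (k : Int) + ((n + 1 : Nat) : Int) = (k + 1) + (n : Int) := by push_cast; ring
      rw [List.set_cons_succ]
      simp only [pvCanon]
      by_cases hr : r.isEmpty
      · rw [if_pos hr, if_pos hr, hkn]
        exact ih (k + 1) n hn' hne
      · rw [if_neg hr, if_neg hr, hkn]
        rw [List.erase_cons_tail (by simp [Prod.ext_iff]; intro _; omega)]
        rw [List.cons_append]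
        exact (ih (k + 1) n hn' hne).cons _

-- one simulated day: B's step tracks A's step, and the heap stays a permutation of pvCanon
theorem step_sim (vals : List (List Int)) (h : List (Int × Int)) (ans d : Int)
    (hperm : h.Perm (pvCanon 0 vals)) :
    pvStepB (vals, ans) d
      = ((pvStepA (vals, h, ans) d).1, (pvStepA (vals, h, ans) d).2.2)
    ∧ (pvStepA (vals, h, ans) d).2.1.Perm (pvCanon 0 (pvStepA (vals, h, ans) d).1) := by
  rcases h with _ | ⟨x, t⟩
  · have hc : pvCanon 0 vals = [] := List.perm_nil.mp hperm.symm
    have hscan : pvScanBest vals = none := by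
      unfold pvScanBest
      rw [scan_eq_min vals 0 none (by simp), hc]; rfl
    constructor
    · simp [pvStepA, pvStepB, pvHeapPop?, hscan]
    · simpa [pvStepA, pvHeapPop?, hc] using hperm
  · -- the popped minimum
    set m := t.foldl pvLexMin x with hm
    have hmem : m ∈ x :: t := foldl_pvLexMin_mem t x
    have hmc : m ∈ pvCanon 0 vals := hperm.mem_iff.mp hmem
    obtain ⟨n, hn, hne, hmeq⟩ := mem_pvCanon vals 0 hmc
    -- B's scan returns exactly m
    have hfold : (pvCanon 0 vals).foldl pvOMin none = some m := by
      have h1 : (x :: t).foldl pvOMin none = some m := by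
        rw [List.foldl_cons]
        simpa [pvOMin] using foldl_pvOMin_some t x
      rw [← hperm.foldl_eq (rcomm := pvOMin_right_comm) none, h1]
    have hscan : pvScanBest vals = some m := by
      unfold pvScanBest
      rw [scan_eq_min vals 0 none (by simp), hfold]
    -- components of m
    have hv : m.1 = pvLast vals[n] := by rw [hmeq]
    have hi : m.2 = (n : Int) := by rw [hmeq]; simp
    have hiN : m.2.toNat = n := by rw [hi]; simp
    -- getD reads row n
    have hrow : vals.getD n [] = vals[n] := List.getD_eq_getElem vals [] hn
    have hA : pvStepA (vals, x :: t, ans) d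
        = (vals.set n vals[n].dropLast,
           (if vals[n].dropLast.isEmpty then (x :: t).erase m
            else (x :: t).erase m ++ [(pvLast vals[n].dropLast, m.2)]), ans + m.1 * d) := by
      simp only [pvStepA, pvHeapPop?, ← hm, hiN, hrow, hv]
    have hB : pvStepB (vals, ans) d
        = (vals.set n vals[n].dropLast, ans + m.1 * d) := by
      simp only [pvStepB, hscan, hiN, hrow, hv]
    refine ⟨by rw [hA, hB], ?_⟩
    rw [hA]
    have hmeq' : m = (pvLast vals[n], (n : Int)) := by rw [hmeq]; simp
    have hset := canon_set vals 0 n hn hne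
    simp only [zero_add, ← hmeq'] at hset
    have herase : ((x :: t).erase m).Perm ((pvCanon 0 vals).erase m) := hperm.erase m
    by_cases hd : vals[n].dropLast.isEmpty
    · simp only [if_pos hd]
      rw [if_pos hd, List.append_nil] at hset
      exact herase.trans hset.symm
    · simp only [if_neg hd]
      rw [if_neg hd] at hset
      rw [hi]
      exact (herase.append_right _).trans hset.symm
  
-- the whole day loop, by induction on the list of days
theorem fold_sim (L : List Int) :
    ∀ (vals : List (List Int)) (h : List (Int × Int)) (ans : Int),
      h.Perm (pvCanon 0 vals) →
      L.foldl pvStepB (vals, ans)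
        = ((L.foldl pvStepA (vals, h, ans)).1, (L.foldl pvStepA (vals, h, ans)).2.2) := by
  induction L with
  | nil => intro vals h ans _; rfl
  | cons d L ih =>
    intro vals h ans hperm
    rw [List.foldl_cons, List.foldl_cons]
    obtain ⟨hstep, hinv⟩ := step_sim vals h ans d hperm
    rcases hA : pvStepA (vals, h, ans) d with ⟨v1, h1, a1⟩
    rw [hA] at hstep hinv
    rw [hstep]
    exact ih v1 h1 a1 hinv

-- ===== VERDICT (by name: the statement is the Claim_ definition above) =====
theorem maxSpending_spec : Claim_equal_maxSpending := by
  intro values _ hpre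
  obtain ⟨hne, hrows, _⟩ := hpre
  unfold Spec_maxSpending maxSpending maxSpending_alt
  have h0 : ((PySem.List.enumerate values 0).map (fun p => (pvLast p.2, p.1))).Perm
      (pvCanon 0 values) := by
    rw [initial_heap values 0 hrows]
  show (List.foldl pvStepA
        (values, (PySem.List.enumerate values 0).map (fun p => (pvLast p.2, p.1)), 0)
        (PySem.List.pyRange 1
          (PySem.List.len values * PySem.List.len ((PySem.List.pyGet? values 0).getD []) + 1) 1)).2.2
      = (List.foldl pvStepB (values, 0)
        (PySem.List.pyRange 1
          (PySem.List.len values * PySem.List.len ((PySem.List.pyGet? values 0).getD []) + 1) 1)).2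
  rw [fold_sim _ values _ 0 h0]
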